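-- pv_equiv track=rewrite | github.com/corinthionia/algorithm-study | python/programmers/implementation/135808.py | solution
-- ===== SOURCE A (Python) =====
-- def solution(k, m, score):
--     score.sort(reverse=True)
--
--     answer = 0
--     boxes = len(score) // m  # 최대 박스의 개수
--
--     for i in range(boxes):
--         box = score[i*m : (i+1)*m]
--         answer += min(box) * m
--
--     return answer
-- ===== SOURCE B (Python) =====
-- def solution(k, m, score):
--     # Sorts score in place (same observable mutation as the original).
--     score.sort(reverse=True)
--     boxes = len(score) // m  # ZeroDivisionError at m == 0, like A
--     answer = 0
--     cnt = 0
--     cur = None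
--     # One streaming pass over the complete-group prefix: keep a running
--     # minimum of the current group and flush it every time the counter
--     # reaches m.  No slicing, no per-group min() scan.
--     for v in score[: boxes * m]:
--         cur = v if cur is None else min(cur, v)
--         cnt += 1
--         if cnt == m:
--             answer += cur * m
--             cnt = 0
--             cur = None
--     return answer
-- ===== Notes on version B (the rewrite author's own statement) =====
-- stated objective: alternative
-- what changed: A's nested structure (loop over groups, slicing each group of m out and scanning it with min()) is replaced by one streaming pass over the complete-group prefix that maintains a running minimum and a counter, flushing cur*m into the answer whenever the counter reaches m.
import Mathlib
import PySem

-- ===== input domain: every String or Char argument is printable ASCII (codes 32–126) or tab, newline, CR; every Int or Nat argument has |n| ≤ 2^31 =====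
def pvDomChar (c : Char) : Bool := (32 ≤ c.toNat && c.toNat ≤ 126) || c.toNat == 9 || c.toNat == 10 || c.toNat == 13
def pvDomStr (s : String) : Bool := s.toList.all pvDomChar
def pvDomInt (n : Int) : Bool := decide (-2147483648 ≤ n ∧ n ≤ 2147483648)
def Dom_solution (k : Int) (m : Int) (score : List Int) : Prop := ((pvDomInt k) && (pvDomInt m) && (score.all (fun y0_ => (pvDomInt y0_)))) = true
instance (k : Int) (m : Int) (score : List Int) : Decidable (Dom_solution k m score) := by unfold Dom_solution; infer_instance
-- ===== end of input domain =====

-- B replaces A's nested loop (slice each group of m, scan it with min()) by one streaming pass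
-- with a counter and a running group minimum (objective: alternative). Python A sorts `score`
-- in place (B does too); the equivalence proved is about the return value.

-- ===== PORT A =====
-- `min(box)` is ported as `(min? box id).getD 0`; the default is never reached, since the
-- loop body only runs for i < boxes with m > 0, where the box slice is nonempty.
def solution (k : Int) (m : Int) (score : List Int) : Int :=
  let s := PySem.List.sorted score (fun x => x) true
  let boxes := PySem.Int.floordiv (s.length : Int) m
  (PySem.List.pyRange 0 boxes 1).foldl
    (fun answer i =>
      let box := PySem.List.slice s (some (i * m)) (some ((i + 1) * m))
      answer + ((PySem.List.min? box (fun x => x)).getD 0) * m) 0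

-- ===== PORT B =====
-- The loop state (answer, cnt, cur) is a triple; `cur is None` is `Option Int`.
def solution_alt (k : Int) (m : Int) (score : List Int) : Int :=
  let s := PySem.List.sorted score (fun x => x) true
  let boxes := PySem.Int.floordiv (s.length : Int) m
  let st := (PySem.List.slice s none (some (boxes * m))).foldl
    (fun (st : Int × Int × Option Int) v =>
      let cur := match st.2.2 with
        | none => v
        | some c => min c v
      let cnt := st.2.1 + 1
      if cnt = m then (st.1 + cur * m, 0, none) else (st.1, cnt, some cur))
    (0, 0, none)
  st.1

-- ===== PRECONDITION & SPEC =====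
-- Pre_ excludes exactly m = 0, where Python A raises ZeroDivisionError.
def Pre_solution (k : Int) (m : Int) (score : List Int) : Prop := m ≠ 0
instance (k : Int) (m : Int) (score : List Int) : Decidable (Pre_solution k m score) := by
  unfold Pre_solution; infer_instance
def pvWitness_solution : Int × Int × List Int := (4, 2, [1, 2, 3, 4, 5])

def Spec_solution (k : Int) (m : Int) (score : List Int) (out : Int) : Prop := out = solution_alt k m score
instance (k : Int) (m : Int) (score : List Int) (out : Int) : Decidable (Spec_solution k m score out) := by unfold Spec_solution; infer_instance

-- ===== CLAIM (what is proved, stated in full; the proofs are below) =====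
def Claim_equal_solution : Prop := ∀ (k : Int) (m : Int) (score : List Int), Dom_solution k m score → Pre_solution k m score → Spec_solution k m score (solution k m score)

-- ===== LEMMAS AND PROOFS =====

-- B's loop body, named for the lemmas (definitionally equal to the lambda in solution_alt).
def pvStep (m : Int) : Int × Int × Option Int → Int → Int × Int × Option Int :=
  fun st v =>
    let cur := match st.2.2 with
      | none => v
      | some c => min c v
    let cnt := st.2.1 + 1
    if cnt = m then (st.1 + cur * m, 0, none) else (st.1, cnt, some cur)

-- running minimum of a nonempty list, as B's loop computes it
def pvRunMin : List Int → Int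
  | [] => 0
  | x :: t => t.foldl min x

lemma pv_pyRange_A0 (b : Int) (hb : b ≤ 0) : PySem.List.pyRange 0 b 1 = [] := by
  simp [PySem.List.pyRange]
  intro h; omega

lemma pv_pyRange_Apos (B : Nat) :
    PySem.List.pyRange 0 (B : Int) 1 = (List.range B).map (fun k : Nat => (k : Int)) := by
  unfold PySem.List.pyRange
  rcases Nat.eq_zero_or_pos B with h | h
  · subst h; norm_num
  · have h0 : (0 : Int) < (B : Int) := by exact_mod_cast h
    rw [if_neg (by norm_num : ¬ (1 : Int) = 0)]
    rw [if_pos (by norm_num : (0:Int) < 1), if_pos h0]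
    norm_num

lemma pv_chunk_min (s : List Int) (hs : s.Pairwise (fun a b => b ≤ a)) (p M : Nat)
    (hM : 1 ≤ M) (h : p + M ≤ s.length) :
    ((PySem.List.min? ((s.drop p).take M) (fun x => x)).getD 0) = s[p + (M - 1)]'(by omega) := by
  set L := (s.drop p).take M with hL
  have hlen : L.length = M := by
    simp [hL]; omega
  have hget : ∀ (j : Nat) (hj : j < M), L[j]'(by omega) = s[p + j]'(by omega) := by
    intro j hj
    simp [hL, List.getElem_take, List.getElem_drop]
  cases hv : PySem.List.min? L (fun x : Int => x) with
  | none =>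
      exfalso
      have := (PySem.List.min?_eq_none_iff L (fun x : Int => x)).1 hv
      rw [this] at hlen; simp at hlen; omega
  | some v =>
      have hmem := PySem.List.min?_mem hv
      have hmin := PySem.List.min?_isMin hv
      have hpw := List.pairwise_iff_getElem.1 hs
      have hlast : s[p + (M - 1)]'(by omega) ∈ L := by
        rw [← hget (M - 1) (by omega)]; exact List.getElem_mem _
      have h1 : v ≤ s[p + (M - 1)]'(by omega) := hmin _ hlast
      have h2 : s[p + (M - 1)]'(by omega) ≤ v := by
        obtain ⟨j, hj, hjv⟩ := List.mem_iff_getElem.1 hmem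
        rw [hlen] at hj
        have hv' : v = s[p + j]'(by omega) := by rw [← hget j hj, hjv]
        rcases Nat.lt_or_ge j (M - 1) with hlt | hge
        · have := hpw (p + j) (p + (M - 1)) (by omega) (by omega) (by omega)
          rw [hv']; exact this
        · have hje : j = M - 1 := by omega
          subst hje
          rw [hv']
      simp [le_antisymm h1 h2]

-- m < 0 : the counter only grows, never equals m, so the answer component never changes
lemma pv_fold_neg (m : Int) (hm : m < 0) :
    ∀ (L : List Int) (a c : Int) (o : Option Int), 0 ≤ c →
      (L.foldl (pvStep m) (a, c, o)).1 = a := by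
  intro L
  induction L with
  | nil => intro a c o _; rfl
  | cons v t ih =>
      intro a c o hc
      have hne : ¬ (c + 1 = m) := by omega
      simp only [List.foldl_cons, pvStep, if_neg hne]
      exact ih a (c + 1) _ (by omega)

-- one group's tail: from counter j (1 ≤ j < M) the pass finishes the group and flushes its
-- running minimum
lemma pv_group_tail (M : Nat) :
    ∀ (t rest : List Int) (a cur : Int) (j : Nat), 1 ≤ j → j < M → j + t.length = M →
      List.foldl (pvStep (M : Int)) (a, (j : Int), some cur) (t ++ rest)
        = List.foldl (pvStep (M : Int)) (a + (t.foldl min cur) * (M : Int), 0, none) rest := by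
  intro t
  induction t with
  | nil => intro rest a cur j h1 h2 h3; simp at h3; omega
  | cons v t' ih =>
      intro rest a cur j h1 h2 h3
      simp only [List.cons_append, List.foldl_cons]
      by_cases hend : j + 1 = M
      · have ht' : t' = [] := by
          have : t'.length = 0 := by simp at h3; omega
          exact List.eq_nil_of_length_eq_zero this
        subst ht'
        have he : ((j : Int) + 1 = (M : Int)) := by exact_mod_cast hend
        simp only [pvStep, if_pos he, List.nil_append, List.foldl_cons, List.foldl_nil]
      · have hne : ¬ ((j : Int) + 1 = (M : Int)) := by
          intro h; exact hend (by exact_mod_cast h)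
        simp only [pvStep, if_neg hne]
        have := ih rest a (min cur v) (j + 1) (by omega) (by simp at h3; omega)
          (by simp at h3 ⊢; omega)
        simpa [List.foldl_cons] using this

-- one whole group of length M, starting from a fresh state
lemma pv_group (M : Nat) (hM : 1 ≤ M) (C rest : List Int) (hC : C.length = M) (a : Int) :
    List.foldl (pvStep (M : Int)) (a, 0, none) (C ++ rest)
      = List.foldl (pvStep (M : Int)) (a + pvRunMin C * (M : Int), 0, none) rest := by
  cases C with
  | nil => simp at hC; omega
  | cons x t =>
      simp only [List.cons_append, List.foldl_cons]
      by_cases h1 : (1 : Nat) = M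
      · have ht : t = [] := by
          have : t.length = 0 := by simp at hC; omega
          exact List.eq_nil_of_length_eq_zero this
        subst ht
        have he : ((0 : Int) + 1 = (M : Int)) := by
          have : ((1 : Nat) : Int) = (M : Int) := by exact_mod_cast h1
          omega
        simp only [pvStep, if_pos he, pvRunMin, List.foldl_nil, List.nil_append]
      · have hlt : 1 < M := by omega
        simp only [pvStep, if_neg (by push_cast; omega : ¬ ((0 : Int) + 1 = (M : Int)))]
        have := pv_group_tail M t rest a x 1 (by omega) hlt (by simp at hC; omega)
        simpa [pvRunMin] using this

-- b complete groups read off from position p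
lemma pv_fold_chunks (M : Nat) (hM : 1 ≤ M) (s : List Int) :
    ∀ (b p : Nat) (a : Int), p + b * M ≤ s.length →
      (((s.drop p).take (b * M)).foldl (pvStep (M : Int)) (a, 0, none)).1
        = a + ((List.range b).map
            (fun k => pvRunMin ((s.drop (p + k * M)).take M) * (M : Int))).sum := by
  intro b
  induction b with
  | zero => intro p a _; simp
  | succ b ih =>
      intro p a h
      have hsplit : (s.drop p).take ((b + 1) * M)
          = (s.drop p).take M ++ ((s.drop (p + M)).take (b * M)) := by
        rw [show (b + 1) * M = M + b * M by ring, List.take_add, List.drop_drop]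
      have hpM : p + M ≤ s.length := by
        have h' : (b + 1) * M = b * M + M := Nat.succ_mul b M
        omega
      have hlenC : ((s.drop p).take M).length = M := by
        rw [List.length_take, List.length_drop]
        omega
      rw [hsplit, pv_group M hM _ _ hlenC]
      rw [ih (p + M) _ (by have h' : (b + 1) * M = b * M + M := Nat.succ_mul b M; omega)]
      rw [List.range_succ_eq_map, List.map_cons, List.map_map, List.sum_cons]
      have hfun : ∀ k ∈ List.range b,
          ((fun k => pvRunMin ((s.drop (p + k * M)).take M) * (M : Int)) ∘ Nat.succ) k
            = pvRunMin ((s.drop (p + M + k * M)).take M) * (M : Int) := by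
        intro k _
        simp only [Function.comp]
        have e : p + Nat.succ k * M = p + M + k * M := by
          rw [Nat.succ_mul]; omega
        rw [e]
      rw [List.map_congr_left hfun]
      simp [Nat.zero_mul]
      ring

-- the running minimum of a descending nonempty list is its last element
lemma pv_runmin_desc_aux :
    ∀ (t : List Int) (x : Int), (x :: t).Pairwise (fun a b => b ≤ a) →
      t.foldl min x = (x :: t).getLast (by simp) := by
  intro t
  induction t with
  | nil => intro x _; simp
  | cons v t' ih =>
      intro x hp
      have hxv : v ≤ x := (List.pairwise_cons.1 hp).1 v (by simp)
      have hp' : (v :: t').Pairwise (fun a b => b ≤ a) := (List.pairwise_cons.1 hp).2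
      have : List.foldl min x (v :: t') = List.foldl min v t' := by
        simp [min_eq_right hxv]
      rw [this, ih v hp']
      simp [List.getLast_cons]

lemma pv_runmin_chunk (s : List Int) (hs : s.Pairwise (fun a b => b ≤ a)) (p M : Nat)
    (hM : 1 ≤ M) (h : p + M ≤ s.length) :
    pvRunMin ((s.drop p).take M) = s[p + (M - 1)]'(by omega) := by
  set L := (s.drop p).take M with hL
  have hlen : L.length = M := by simp [hL]; omega
  have hpw : L.Pairwise (fun a b => b ≤ a) :=
    List.Pairwise.sublist ((List.take_sublist _ _).trans (List.drop_sublist _ _)) hs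
  cases hLc : L with
  | nil => rw [hLc] at hlen; simp at hlen; omega
  | cons x t =>
      have := pv_runmin_desc_aux t x (hLc ▸ hpw)
      simp only [pvRunMin]
      rw [this, List.getLast_eq_getElem]
      have hidx : (x :: t).length - 1 = M - 1 := by rw [← hLc, hlen]
      have hget : ∀ (j : Nat) (hj : j < M), L[j]'(by omega) = s[p + j]'(by omega) := by
        intro j hj
        simp [hL, List.getElem_take, List.getElem_drop]
      calc (x :: t)[(x :: t).length - 1]'(by simp)
          = L[M - 1]'(by omega) := by
            congr 1 <;> simp [hLc, hidx]
        _ = s[p + (M - 1)]'(by omega) := hget (M - 1) (by omega)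

lemma pv_main (m : Int) (hm : m ≠ 0) (s : List Int)
    (hs : s.Pairwise (fun a b => b ≤ a)) :
    (PySem.List.pyRange 0 (PySem.Int.floordiv (s.length : Int) m) 1).foldl
      (fun answer i =>
        answer + ((PySem.List.min? (PySem.List.slice s (some (i * m)) (some ((i + 1) * m))) (fun x => x)).getD 0) * m) 0
    = ((PySem.List.slice s none (some ((PySem.Int.floordiv (s.length : Int) m) * m))).foldl
        (pvStep m) (0, 0, none)).1 := by
  rcases lt_or_gt_of_ne hm with hneg | hpos
  · -- m < 0 : A's range is empty; B's counter never reaches m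
    have hb : PySem.Int.floordiv (s.length : Int) m ≤ 0 := by
      unfold PySem.Int.floordiv
      rw [Int.fdiv_eq_ediv]
      have h1 : (s.length : Int) / m ≤ 0 :=
        Int.ediv_nonpos_of_nonneg_of_nonpos (by positivity) (le_of_lt hneg)
      split_ifs <;> omega
    rw [pv_pyRange_A0 _ hb, pv_fold_neg m hneg _ 0 0 none le_rfl]
    rfl
  · -- m > 0
    obtain ⟨M, rfl⟩ : ∃ M : Nat, m = (M : Int) := ⟨m.toNat, (Int.toNat_of_nonneg (le_of_lt hpos)).symm⟩
    have hM1 : 1 ≤ M := by exact_mod_cast hpos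
    set N := s.length with hN
    have hb : PySem.Int.floordiv (N : Int) (M : Int) = ((N / M : Nat) : Int) := by
      unfold PySem.Int.floordiv
      rw [Int.fdiv_eq_ediv]
      rw [if_pos (Or.inl (by positivity))]
      push_cast
      omega
    set B := N / M with hB
    have hBM : B * M ≤ N := Nat.div_mul_le_self N M
    -- A side
    rw [hb, pv_pyRange_Apos]
    rw [PySem.List.foldl_add, List.map_map]
    simp only [zero_add, Function.comp_def]
    have hpointA : ∀ k ∈ List.range B,
        ((PySem.List.min? (PySem.List.slice s (some ((k : Int) * (M : Int))) (some (((k : Int) + 1) * (M : Int)))) (fun x => x)).getD 0) * (M : Int)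
        = (s.getD (k * M + (M - 1)) 0) * (M : Int) := by
      intro k hk
      have hk' : k < B := List.mem_range.1 hk
      have hle : k * M + M ≤ N := by
        have h2 : (k + 1) * M ≤ B * M := Nat.mul_le_mul_right M hk'
        have h4 : (k + 1) * M = k * M + M := by rw [Nat.succ_mul]
        omega
      have e1 : (k : Int) * (M : Int) = ((k * M : Nat) : Int) := by push_cast; ring
      have e2 : ((k : Int) + 1) * (M : Int) = ((k * M + M : Nat) : Int) := by push_cast; ring
      rw [e1, e2, PySem.List.slice_natCast]
      have e3 : k * M + M - k * M = M := by omega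
      rw [e3, pv_chunk_min s hs (k * M) M hM1 hle]
      rw [List.getD_eq_getElem s 0 (by omega : k * M + (M - 1) < s.length)]
    rw [List.map_congr_left hpointA]
    -- B side
    have eBM : ((B : Int)) * (M : Int) = ((B * M : Nat) : Int) := by push_cast; ring
    rw [eBM, PySem.List.slice_to_natCast]
    have htake : s.take (B * M) = (s.drop 0).take (B * M) := by simp
    rw [htake, pv_fold_chunks M hM1 s B 0 0 (by omega)]
    rw [zero_add]
    congr 1
    apply List.map_congr_left
    intro k hk
    have hk' : k < B := List.mem_range.1 hk
    have hle : k * M + M ≤ N := by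
      have h2 : (k + 1) * M ≤ B * M := Nat.mul_le_mul_right M hk'
      have h4 : (k + 1) * M = k * M + M := by rw [Nat.succ_mul]
      omega
    rw [Nat.zero_add, pv_runmin_chunk s hs (k * M) M hM1 hle]
    rw [List.getD_eq_getElem s 0 (by omega : k * M + (M - 1) < s.length)]

-- ===== VERDICT (by name: the statement is the Claim_ definition above) =====
theorem solution_spec : Claim_equal_solution := by
  intro k m score _ hpre
  unfold Spec_solution solution solution_alt
  exact pv_main m hpre _ (PySem.List.sorted_pairwise_rev score (fun x => x))
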